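-- pv_equiv track=rewrite | github.com/Raudbjorn/TTTRPS | planning/embeddings/rapydocs/src/embeddings/parsers/json_parser.py | _analyze_array_patterns
-- ===== SOURCE A (Python) =====
-- from typing import List, Dict, Any, Optional, Union
--
-- def _analyze_array_patterns(arr: List) -> Dict[str, Any]:
--     """Analyze patterns in array data"""
--     patterns = {}
--
--     if not arr:
--         return patterns
--
--     # Check if sorted
--     if all(isinstance(item, (int, float, str)) for item in arr):
--         patterns['sorted'] = arr == sorted(arr)
--         patterns['reverse_sorted'] = arr == sorted(arr, reverse=True)
--
--     # Check for unique values
--     patterns['unique_values'] = len(arr) == len(set(str(item) for item in arr))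
--
--     # Check for time series pattern
--     if all(isinstance(item, dict) for item in arr[:10]):
--         # Look for timestamp fields
--         for item in arr[:10]:
--             for key in item.keys():
--                 if any(t in key.lower() for t in ['time', 'date', 'timestamp']):
--                     patterns['potential_time_series'] = True
--                     break
--
--     return patterns
-- ===== SOURCE B (Python) =====
-- def _analyze_array_patterns(arr):
--     """Analyze patterns in array data (single linear scan, no sorting)."""
--     if not arr:
--         return {}
--     pairs = list(zip(arr, arr[1:]))
--     return {
--         'sorted': all(a <= b for a, b in pairs),
--         'reverse_sorted': all(a >= b for a, b in pairs),
--         'unique_values': len(set(arr)) == len(arr),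
--     }
-- ===== Notes on version B (the rewrite author's own statement) =====
-- stated objective: faster
-- what changed: Replaces the two full sorts and the stringified set with a single adjacent-pair scan (zip) for sorted/reverse_sorted and a direct int set for uniqueness.
import Mathlib
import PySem

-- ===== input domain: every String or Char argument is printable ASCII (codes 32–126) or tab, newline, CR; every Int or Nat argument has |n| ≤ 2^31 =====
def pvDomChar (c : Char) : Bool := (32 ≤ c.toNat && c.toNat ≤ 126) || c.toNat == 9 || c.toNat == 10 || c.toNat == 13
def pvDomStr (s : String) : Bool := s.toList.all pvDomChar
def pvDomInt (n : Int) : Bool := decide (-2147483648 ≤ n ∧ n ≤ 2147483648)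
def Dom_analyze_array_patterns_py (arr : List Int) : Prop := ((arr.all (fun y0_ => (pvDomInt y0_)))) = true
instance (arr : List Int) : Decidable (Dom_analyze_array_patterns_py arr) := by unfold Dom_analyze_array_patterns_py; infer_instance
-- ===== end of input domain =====

-- B replaces A's two full sorts and its stringified set with one adjacent-pair scan and a direct
-- int set; a timing run measured B faster (asymptotically O(n) vs O(n log n)).

-- ===== PORT A =====
-- Transliteration of A on `List Int` inputs: `all(isinstance(item, (int, float, str)) for item in arr)`
-- is identically True there, and `all(isinstance(item, dict) for item in arr[:10])` is False for the
-- (nonempty) lists reaching it, so the time-series loop adds no key; both type tests are transcribed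
-- at those constant truth values.
def analyze_array_patterns_py (arr : List Int) : List (String × Bool) :=
  let patterns : PySem.Dict String Bool := PySem.Dict.empty
  if arr = [] then patterns.items
  else
    let patterns := patterns.insert "sorted" (arr == PySem.List.sorted arr (fun x => x))
    let patterns := patterns.insert "reverse_sorted" (arr == PySem.List.sorted arr (fun x => x) true)
    let patterns := patterns.insert "unique_values"
      ((arr.length : Int) == PySem.Set.len (PySem.Set.ofList (arr.map PySem.Int.toStr)))
    patterns.items

-- ===== PORT B =====
def analyze_array_patterns_py_alt (arr : List Int) : List (String × Bool) :=
  if arr = [] then []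
  else
    let pairs := arr.zip (PySem.List.slice arr (some 1) none)
    [("sorted", pairs.all (fun p => decide (p.1 ≤ p.2))),
     ("reverse_sorted", pairs.all (fun p => decide (p.2 ≤ p.1))),
     ("unique_values", PySem.Set.len (PySem.Set.ofList arr) == (arr.length : Int))]

-- ===== PRECONDITION & SPEC =====
def Spec_analyze_array_patterns_py (arr : List Int) (out : List (String × Bool)) : Prop := out = analyze_array_patterns_py_alt arr
instance (arr : List Int) (out : List (String × Bool)) : Decidable (Spec_analyze_array_patterns_py arr out) := by unfold Spec_analyze_array_patterns_py; infer_instance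

-- ===== CLAIM (what is proved, stated in full; the proofs are below) =====
def Claim_equal_analyze_array_patterns_py : Prop := ∀ (arr : List Int), Dom_analyze_array_patterns_py arr → Spec_analyze_array_patterns_py arr (analyze_array_patterns_py arr)

-- ===== LEMMAS AND PROOFS =====

-- `Nat.toDigitsCore` appends to its accumulator.
lemma pv_toDigitsCore_acc (fuel : Nat) : ∀ (n : Nat) (ds : List Char),
    Nat.toDigitsCore 10 fuel n ds = Nat.toDigitsCore 10 fuel n [] ++ ds := by
  induction fuel with
  | zero => intro n ds; simp [Nat.toDigitsCore]
  | succ f ih =>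
    intro n ds
    simp only [Nat.toDigitsCore]
    by_cases h : n / 10 = 0
    · simp [h]
    · simp only [h]
      rw [ih (n / 10) [(n % 10).digitChar], ih (n / 10) ((n % 10).digitChar :: ds)]
      simp

-- `Nat.toDigitsCore` ignores its fuel once the fuel exceeds the number.
lemma pv_toDigitsCore_fuel : ∀ (n f1 f2 : Nat), n < f1 → n < f2 →
    Nat.toDigitsCore 10 f1 n [] = Nat.toDigitsCore 10 f2 n [] := by
  intro n
  induction n using Nat.strong_induction_on with
  | _ n ih =>
    intro f1 f2 h1 h2
    match f1, f2 with
    | g1 + 1, g2 + 1 =>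
      simp only [Nat.toDigitsCore]
      by_cases h : n / 10 = 0
      · simp [h]
      · have hn10 : n / 10 < n := Nat.div_lt_self (by omega) (by omega)
        simp only [h]
        rw [pv_toDigitsCore_acc g1, pv_toDigitsCore_acc g2,
          ih (n / 10) hn10 g1 g2 (by omega) (by omega)]

-- Recursive characterisation of `Nat.toDigits 10`.
lemma pv_toDigits_lt (n : Nat) (h : n < 10) : Nat.toDigits 10 n = [Nat.digitChar n] := by
  simp [Nat.toDigits, Nat.toDigitsCore, Nat.div_eq_of_lt h, Nat.mod_eq_of_lt h]

lemma pv_toDigits_ge (n : Nat) (h : 10 ≤ n) :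
    Nat.toDigits 10 n = Nat.toDigits 10 (n / 10) ++ [Nat.digitChar (n % 10)] := by
  have h0 : n / 10 ≠ 0 := by omega
  simp only [Nat.toDigits, Nat.toDigitsCore, h0, if_false]
  rw [pv_toDigitsCore_acc n]
  rw [pv_toDigitsCore_fuel (n / 10) n (n / 10 + 1) (by omega) (by omega)]
  congr 1

lemma pv_mem_toDigits (n : Nat) : ∀ c ∈ Nat.toDigits 10 n, ∃ k < 10, c = Nat.digitChar k := by
  induction n using Nat.strong_induction_on with
  | _ n ih =>
    by_cases h : n < 10
    · rw [pv_toDigits_lt n h]; intro c hc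
      simp at hc; exact ⟨n, h, hc⟩
    · rw [pv_toDigits_ge n (by omega)]
      intro c hc
      rcases List.mem_append.mp hc with hc | hc
      · exact ih (n / 10) (Nat.div_lt_self (by omega) (by omega)) c hc
      · simp at hc; exact ⟨n % 10, Nat.mod_lt _ (by omega), hc⟩

lemma pv_toDigits_ne_nil (n : Nat) : Nat.toDigits 10 n ≠ [] := by
  by_cases h : n < 10
  · rw [pv_toDigits_lt n h]; simp
  · rw [pv_toDigits_ge n (by omega)]; simp

lemma pv_digitChar_inj : ∀ m < 10, ∀ n < 10, Nat.digitChar m = Nat.digitChar n → m = n := by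
  decide

lemma pv_toDigits_inj : ∀ m n : Nat, Nat.toDigits 10 m = Nat.toDigits 10 n → m = n := by
  intro m
  induction m using Nat.strong_induction_on with
  | _ m ih =>
    intro n h
    by_cases hm : m < 10 <;> by_cases hn : n < 10
    · rw [pv_toDigits_lt m hm, pv_toDigits_lt n hn] at h
      exact pv_digitChar_inj m hm n hn (by simpa using h)
    · exfalso
      rw [pv_toDigits_lt m hm, pv_toDigits_ge n (by omega)] at h
      have hlen := congrArg List.length h
      simp only [List.length_append, List.length_cons,
        List.length_nil] at hlen
      have hpos : 0 < (Nat.toDigits 10 (n / 10)).length :=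
        List.length_pos_of_ne_nil (pv_toDigits_ne_nil _)
      omega
    · exfalso
      rw [pv_toDigits_lt n hn, pv_toDigits_ge m (by omega)] at h
      have hlen := congrArg List.length h
      simp only [List.length_append, List.length_cons,
        List.length_nil] at hlen
      have hpos : 0 < (Nat.toDigits 10 (m / 10)).length :=
        List.length_pos_of_ne_nil (pv_toDigits_ne_nil _)
      omega
    · rw [pv_toDigits_ge m (by omega), pv_toDigits_ge n (by omega)] at h
      have h2 := List.append_inj h (by
        have := congrArg List.length h
        simpa using this)
      have hdiv : m / 10 = n / 10 := ih (m / 10) (Nat.div_lt_self (by omega) (by omega)) _ h2.1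
      have hmod : m % 10 = n % 10 := by
        have := h2.2
        simp at this
        exact pv_digitChar_inj _ (Nat.mod_lt _ (by omega)) _ (Nat.mod_lt _ (by omega)) this
      omega

lemma pv_dash_not_mem_toDigits (n : Nat) : '-' ∉ Nat.toDigits 10 n := by
  intro h
  obtain ⟨k, hk, he⟩ := pv_mem_toDigits n '-' h
  interval_cases k <;> exact absurd he (by decide)

lemma pv_toChars_inj : Function.Injective PySem.Int.toChars := by
  intro m n h
  simp only [PySem.Int.toChars] at h
  by_cases hm : m < 0 <;> by_cases hn : n < 0
  · rw [if_pos hm, if_pos hn] at h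
    simp only [List.cons.injEq, true_and] at h
    have := pv_toDigits_inj _ _ h
    omega
  · exfalso
    rw [if_pos hm, if_neg hn] at h
    exact pv_dash_not_mem_toDigits n.toNat (by rw [← h]; exact List.mem_cons_self ..)
  · exfalso
    rw [if_neg hm, if_pos hn] at h
    exact pv_dash_not_mem_toDigits m.toNat (by rw [h]; exact List.mem_cons_self ..)
  · rw [if_neg hm, if_neg hn] at h
    have := pv_toDigits_inj _ _ h
    omega

lemma pv_toStr_inj : Function.Injective PySem.Int.toStr := by
  intro m n h
  have : (PySem.Int.toStr m).toList = (PySem.Int.toStr n).toList := by rw [h]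
  rw [PySem.Int.toList_toStr, PySem.Int.toList_toStr] at this
  exact pv_toChars_inj this

-- set(str(x) for x in l) is the stringwise image of set(l): str is injective on int.
lemma pv_ofList_map_toStr (l : List Int) :
    PySem.Set.ofList (l.map PySem.Int.toStr) = (PySem.Set.ofList l).map PySem.Int.toStr := by
  induction l with
  | nil => rfl
  | cons x xs ih =>
    rw [List.map_cons, PySem.Set.ofList_cons, PySem.Set.ofList_cons, ih, List.map_cons]
    congr 1
    simp only [PySem.Set.discard, List.filter_map]
    congr 1
    apply List.filter_congr
    intro y _
    simp only [Function.comp]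
    rw [Bool.eq_iff_iff]
    simp [pv_toStr_inj.eq_iff]

-- adjacent-pair scan ↔ chain
lemma pv_zip_all_iff_isChain (r : Int → Int → Prop) [DecidableRel r] (l : List Int) :
    (l.zip (l.drop 1)).all (fun p => decide (r p.1 p.2)) = true ↔ List.IsChain r l := by
  induction l with
  | nil => simp
  | cons a t ih =>
    cases t with
    | nil => simp
    | cons b u => simp_all [List.isChain_cons_cons]

lemma pv_sorted_bool (arr : List Int) :
    (arr == PySem.List.sorted arr (fun x => x)) =
      (arr.zip (arr.drop 1)).all (fun p => decide (p.1 ≤ p.2)) := by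
  rw [Bool.eq_iff_iff, beq_iff_eq, pv_zip_all_iff_isChain (· ≤ ·) arr,
    List.isChain_iff_pairwise]
  constructor
  · intro h; rw [h]; exact PySem.List.sorted_pairwise arr (fun x => x)
  · intro h; exact (PySem.List.sorted_eq_self_of_pairwise arr (fun x => x) h).symm

lemma pv_rev_sorted_bool (arr : List Int) :
    (arr == PySem.List.sorted arr (fun x => x) true) =
      (arr.zip (arr.drop 1)).all (fun p => decide (p.2 ≤ p.1)) := by
  rw [Bool.eq_iff_iff, beq_iff_eq,
    pv_zip_all_iff_isChain (fun a b => b ≤ a) arr,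
    @List.isChain_iff_pairwise _ (fun a b : Int => b ≤ a) arr
      ⟨fun hab hbc => le_trans hbc hab⟩]
  constructor
  · intro h; rw [h]; exact PySem.List.sorted_pairwise_rev arr (fun x => x)
  · intro h; exact (PySem.List.sorted_rev_eq_self_of_pairwise arr (fun x => x) h).symm

lemma pv_unique_bool (arr : List Int) :
    ((arr.length : Int) == PySem.Set.len (PySem.Set.ofList (arr.map PySem.Int.toStr))) =
      (PySem.Set.len (PySem.Set.ofList arr) == (arr.length : Int)) := by
  rw [pv_ofList_map_toStr]
  simp only [PySem.Set.len, List.length_map]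
  rw [Bool.eq_iff_iff]
  simp only [beq_iff_eq]
  exact eq_comm

-- ===== VERDICT (by name: the statement is the Claim_ definition above) =====
theorem analyze_array_patterns_py_spec : Claim_equal_analyze_array_patterns_py := by
  intro arr _
  unfold Spec_analyze_array_patterns_py analyze_array_patterns_py analyze_array_patterns_py_alt
  by_cases h : arr = []
  · subst h; rfl
  · rw [if_neg h, if_neg h, PySem.List.slice_from arr (by norm_num : (0:Int) ≤ 1)]
    rw [pv_sorted_bool, pv_rev_sorted_bool, pv_unique_bool]
    rfl
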